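-- pv_equiv track=rewrite | github.com/craigrallen/ha-habitus | habitus/habitus/automation_gap.py | _pick_known_entity
-- ===== SOURCE A (Python) =====
-- def _pick_known_entity(known_entity_ids, domains=None, keywords=None):
--     """Pick best entity from known IDs to avoid generic placeholders."""
--     domains = domains or []
--     keywords = [k.lower() for k in (keywords or [])]
--     candidates = []
--     for eid in known_entity_ids:
--         if "." not in eid:
--             continue
--         domain, _obj = eid.split(".", 1)
--         if domains and domain not in domains:
--             continue
--         lower = eid.lower()
--         score = 0
--         score += sum(4 for kw in keywords if kw in lower)
--         if "living" in lower or "hall" in lower or "main" in lower: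
--             score += 1
--         candidates.append((score, eid.lower()))
--     if not candidates:
--         return None
--     candidates.sort(key=lambda t: (-t[0], t[1]))
--     return candidates[0][1]
-- ===== SOURCE B (Python) =====
-- def _pick_known_entity(known_entity_ids, domains=None, keywords=None):
--     """Staged passes: filter eligible lowered ids, find the max score, return the smallest lowered id with that score."""
--     doms = domains or []
--     kws = [k.lower() for k in (keywords or [])]
--
--     def score(lower):
--         s = 4 * sum(kw in lower for kw in kws)
--         if "living" in lower or "hall" in lower or "main" in lower:
--             s += 1
--         return s
--
--     lowers = [eid.lower() for eid in known_entity_ids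
--               if "." in eid and (not doms or eid.split(".", 1)[0] in doms)]
--     if not lowers:
--         return None
--     best = max(score(l) for l in lowers)
--     return min(l for l in lowers if score(l) == best)
-- ===== Notes on version B (the rewrite author's own statement) =====
-- stated objective: alternative
-- what changed: B replaces A's build-candidate-list-then-sort-then-head pipeline by staged passes with no sort: filter the eligible lowered ids, compute the maximum score, then return the lexicographically smallest lowered id achieving it, which reproduces the sort's (-score, lower) tie-break exactly.
import Mathlib
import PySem

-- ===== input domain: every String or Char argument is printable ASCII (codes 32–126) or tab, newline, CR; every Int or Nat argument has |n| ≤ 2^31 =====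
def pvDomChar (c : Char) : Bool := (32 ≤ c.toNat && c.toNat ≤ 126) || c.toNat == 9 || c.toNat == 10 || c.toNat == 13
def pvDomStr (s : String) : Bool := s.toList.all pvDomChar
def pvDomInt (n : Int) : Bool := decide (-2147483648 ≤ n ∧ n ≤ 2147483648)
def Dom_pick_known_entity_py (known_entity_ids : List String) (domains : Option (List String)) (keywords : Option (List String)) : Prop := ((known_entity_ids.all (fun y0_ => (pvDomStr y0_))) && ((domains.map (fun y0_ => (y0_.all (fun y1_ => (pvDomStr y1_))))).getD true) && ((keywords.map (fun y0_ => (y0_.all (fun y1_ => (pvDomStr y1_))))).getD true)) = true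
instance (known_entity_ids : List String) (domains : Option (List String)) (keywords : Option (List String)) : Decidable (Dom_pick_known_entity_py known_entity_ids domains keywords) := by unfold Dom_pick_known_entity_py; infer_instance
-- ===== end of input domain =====

-- B replaces A's candidate-list + sort + head by staged passes with no sort: filter eligible lowered
-- ids, take the maximum score, then the lexicographically smallest lowered id at that score
-- (same value as sorting by (-score, lower) and taking the head): alternative algorithm.


-- ===== PORT A =====
-- literal transliteration of _pick_known_entity: build candidates, sort by (-score, lower), take [0][1]
def pick_known_entity_py (known_entity_ids : List String) (domains : Option (List String)) (keywords : Option (List String)) : Option String :=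
  let domains := domains.getD []                                   -- domains or []
  let keywords := (keywords.getD []).map (fun k => PySem.Str.lower k)
  let candidates := known_entity_ids.foldl (fun candidates eid =>
    if PySem.Str.isIn "." eid then
      let domain := ((PySem.Str.splitMax? eid "." 1).getD []).headD ""   -- eid.split(".", 1); "." ∈ eid so parts nonempty
      if decide (domains ≠ []) && !(domains.contains domain) then candidates
      else
        let lower := PySem.Str.lower eid
        let score : Int := 0
        let score := score + ((keywords.filter (fun kw => PySem.Str.isIn kw lower)).map (fun _ => (4 : Int))).sum
        let score := if PySem.Str.isIn "living" lower || PySem.Str.isIn "hall" lower || PySem.Str.isIn "main" lower then score + 1 else score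
        candidates ++ [(score, PySem.Str.lower eid)]
    else candidates) ([] : List (Int × String))
  if candidates = [] then none
  else  -- candidates[0][1] after the sort; the guard makes candidates nonempty, so headD's default is never used
    some (((PySem.List.sorted2 candidates (fun t => -t.1) (fun t => t.2)).headD ((0 : Int), "")).2)

-- ===== PORT B =====
-- Source B's local helper score(lower): 4 per matching keyword, +1 for living/hall/main
def pvScoreB (kws : List String) (lower : String) : Int :=
  let s : Int := 4 * (kws.countP (fun kw => PySem.Str.isIn kw lower) : Int)
  if PySem.Str.isIn "living" lower || PySem.Str.isIn "hall" lower || PySem.Str.isIn "main" lower then s + 1 else s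

-- transliteration of Source B: comprehension of eligible lowered ids, then max score, then min id at that score
def pick_known_entity_py_alt (known_entity_ids : List String) (domains : Option (List String)) (keywords : Option (List String)) : Option String :=
  let doms := domains.getD []
  let kws := (keywords.getD []).map (fun k => PySem.Str.lower k)
  let lowers := known_entity_ids.filterMap (fun eid =>
    if PySem.Str.isIn "." eid &&
       (decide (doms = []) || doms.contains (((PySem.Str.splitMax? eid "." 1).getD []).headD ""))
    then some (PySem.Str.lower eid) else none)
  if lowers = [] then none
  else
    let best := (PySem.List.max? (lowers.map (pvScoreB kws)) (fun x => x)).getD 0  -- lowers ≠ [], so max? is some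
    PySem.List.min? (lowers.filter (fun l => pvScoreB kws l == best)) (fun x => x) -- best is attained, so min? is some

-- ===== PRECONDITION & SPEC =====
def Spec_pick_known_entity_py (known_entity_ids : List String) (domains : Option (List String)) (keywords : Option (List String)) (out : Option String) : Prop := out = pick_known_entity_py_alt known_entity_ids domains keywords
instance (known_entity_ids : List String) (domains : Option (List String)) (keywords : Option (List String)) (out : Option String) : Decidable (Spec_pick_known_entity_py known_entity_ids domains keywords out) := by unfold Spec_pick_known_entity_py; infer_instance

-- ===== CLAIM (what is proved, stated in full; the proofs are below) =====
def Claim_equal_pick_known_entity_py : Prop := ∀ (known_entity_ids : List String) (domains : Option (List String)) (keywords : Option (List String)), Dom_pick_known_entity_py known_entity_ids domains keywords → Spec_pick_known_entity_py known_entity_ids domains keywords (pick_known_entity_py known_entity_ids domains keywords)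

-- ===== LEMMAS AND PROOFS =====

-- the candidate sort's "strictly before" test (sorted2's lt for key (-score, lower))
def pvBefore (a b : Int × String) : Bool :=
  decide (-a.1 < -b.1) || (!decide (-b.1 < -a.1) && decide (a.2 < b.2))

-- one step of "keep the best so far"
def pvMin (h : Option (Int × String)) (x : Int × String) : Option (Int × String) :=
  match h with
  | none => some x
  | some h => if pvBefore x h then some x else some h

-- the candidate(s) contributed by one id ([] if filtered out)
def pvCand (ds kws : List String) (eid : String) : List (Int × String) :=
  if PySem.Str.isIn "." eid then
    let domain := ((PySem.Str.splitMax? eid "." 1).getD []).headD ""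
    if decide (ds ≠ []) && !(ds.contains domain) then []
    else [(pvScoreB kws (PySem.Str.lower eid), PySem.Str.lower eid)]
  else []

theorem pvBefore_iff (s bs : Int) (l bl : String) :
    pvBefore (s, l) (bs, bl) = true ↔ (s > bs ∨ (s = bs ∧ l < bl)) := by
  simp only [pvBefore, Bool.or_eq_true, Bool.and_eq_true, Bool.not_eq_true', decide_eq_true_eq,
    decide_eq_false_iff_not]
  constructor
  · rintro (h | ⟨h1, h2⟩)
    · exact Or.inl (by omega)
    · rcases eq_or_lt_of_le (show bs ≤ s by omega) with h | h
      · exact Or.inr ⟨h.symm, h2⟩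
      · exact Or.inl (by omega)
  · rintro (h | ⟨h1, h2⟩)
    · exact Or.inl (by omega)
    · exact Or.inr ⟨by omega, h2⟩

theorem pvBefore_irrefl (a : Int × String) : pvBefore a a = false := by
  rcases a with ⟨s, l⟩
  rw [Bool.eq_false_iff]
  intro h
  rcases (pvBefore_iff s s l l).mp h with h | ⟨_, h⟩ <;> exact absurd h (by simp)

theorem pvBefore_trans {a b c : Int × String}
    (hab : pvBefore a b = true) (hbc : pvBefore b c = true) : pvBefore a c = true := by
  rcases a with ⟨s1, l1⟩; rcases b with ⟨s2, l2⟩; rcases c with ⟨s3, l3⟩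
  rw [pvBefore_iff] at *
  rcases hab with h | ⟨h1, h2⟩ <;> rcases hbc with g | ⟨g1, g2⟩
  · exact Or.inl (by omega)
  · exact Or.inl (by omega)
  · exact Or.inl (by omega)
  · exact Or.inr ⟨by omega, lt_trans h2 g2⟩

theorem pvBefore_total {a b : Int × String} (h : pvBefore a b = false) :
    a = b ∨ pvBefore b a = true := by
  rcases a with ⟨s1, l1⟩; rcases b with ⟨s2, l2⟩
  rw [Bool.eq_false_iff] at h
  rw [pvBefore_iff]
  by_cases hs : s1 = s2
  · rcases lt_trichotomy l1 l2 with hl | hl | hl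
    · exact absurd ((pvBefore_iff _ _ _ _).mpr (Or.inr ⟨hs, hl⟩)) h
    · exact Or.inl (by rw [hs, hl])
    · exact Or.inr (Or.inr ⟨hs.symm, hl⟩)
  · by_cases hlt : s1 > s2
    · exact absurd ((pvBefore_iff _ _ _ _).mpr (Or.inl hlt)) h
    · exact Or.inr (Or.inl (by omega))

theorem head?_insertBy (bf : Int × String → Int × String → Bool) (x : Int × String)
    (acc : List (Int × String)) :
    (PySem.List.insertBy bf x acc).head? =
      some (match acc.head? with | none => x | some y => if bf x y then x else y) := by
  cases acc with
  | nil => simp [PySem.List.insertBy]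
  | cons y ys =>
    simp only [PySem.List.insertBy, List.head?_cons]
    split <;> simp_all

theorem pvMin_eq (h : Option (Int × String)) (x : Int × String) :
    pvMin h x = some (match h with | none => x | some y => if pvBefore x y then x else y) := by
  cases h with
  | none => rfl
  | some y => simp only [pvMin]; split <;> rfl

theorem head?_foldl_insertBy (xs : List (Int × String)) (acc : List (Int × String)) :
    (xs.foldl (fun acc x => PySem.List.insertBy pvBefore x acc) acc).head? =
      xs.foldl pvMin acc.head? := by
  induction xs generalizing acc with
  | nil => rfl
  | cons x xs ih =>
    rw [List.foldl_cons, List.foldl_cons, ih, head?_insertBy, ← pvMin_eq]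

-- the head of the sorted candidate list is the pvMin-fold of the candidates
theorem sorted2_head (cs : List (Int × String)) :
    (PySem.List.sorted2 cs (fun t => -t.1) (fun t => t.2)).head? = cs.foldl pvMin none := by
  have h : PySem.List.sorted2 cs (fun t => -t.1) (fun t => t.2) =
      cs.foldl (fun acc x => PySem.List.insertBy pvBefore x acc) [] := by
    simp only [PySem.List.sorted2]
    rfl
  rw [h, head?_foldl_insertBy]
  rfl

-- the pvMin-fold yields a minimal element under pvBefore
theorem foldl_pvMin_some (cs : List (Int × String)) (b : Int × String) :
    ∃ m, cs.foldl pvMin (some b) = some m ∧ (m = b ∨ m ∈ cs) ∧ pvBefore b m = false ∧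
      ∀ x ∈ cs, pvBefore x m = false := by
  induction cs generalizing b with
  | nil => exact ⟨b, rfl, Or.inl rfl, pvBefore_irrefl b, by simp⟩
  | cons x cs ih =>
    simp only [List.foldl_cons, pvMin]
    by_cases hx : pvBefore x b = true
    · rw [if_pos hx]
      obtain ⟨m, hm, hmem, hxm, hall⟩ := ih x
      refine ⟨m, hm, ?_, ?_, ?_⟩
      · rcases hmem with h | h
        · exact Or.inr (h ▸ List.mem_cons_self)
        · exact Or.inr (List.mem_cons_of_mem _ h)
      · rw [Bool.eq_false_iff]; intro hbm
        exact (Bool.eq_false_iff.mp hxm) (pvBefore_trans hx hbm)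
      · intro y hy
        rcases List.mem_cons.mp hy with rfl | hy
        · exact hxm
        · exact hall y hy
    · rw [if_neg hx]
      rw [Bool.not_eq_true] at hx
      obtain ⟨m, hm, hmem, hbm, hall⟩ := ih b
      refine ⟨m, hm, ?_, hbm, ?_⟩
      · rcases hmem with h | h
        · exact Or.inl h
        · exact Or.inr (List.mem_cons_of_mem _ h)
      · intro y hy
        rcases List.mem_cons.mp hy with rfl | hy
        · rw [Bool.eq_false_iff]; intro hxm
          rcases pvBefore_total hx with he | hba
          · rw [he] at hxm; exact (Bool.eq_false_iff.mp hbm) hxm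
          · exact (Bool.eq_false_iff.mp hbm) (pvBefore_trans hba hxm)
        · exact hall y hy

-- elements (score, lower) with score a function of lower: mutual non-beforeness forces equality
theorem pv_unique (f : String → Int) (lowers : List String) (x y : Int × String)
    (hx : x ∈ lowers.map (fun l => (f l, l))) (hy : y ∈ lowers.map (fun l => (f l, l)))
    (hxy : pvBefore x y = false) (hyx : pvBefore y x = false) : x = y := by
  obtain ⟨a, _, rfl⟩ := List.mem_map.mp hx
  obtain ⟨b, _, rfl⟩ := List.mem_map.mp hy
  rw [Bool.eq_false_iff] at hxy hyx
  have hab : a = b := by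
    rcases lt_trichotomy a b with h | h | h
    · by_cases hf : f a = f b
      · exact absurd ((pvBefore_iff _ _ _ _).mpr (Or.inr ⟨hf, h⟩)) hxy
      · rcases lt_or_gt_of_ne (show f a ≠ f b from hf) with hs | hs
        · exact absurd ((pvBefore_iff _ _ _ _).mpr (Or.inl hs)) hyx
        · exact absurd ((pvBefore_iff _ _ _ _).mpr (Or.inl hs)) hxy
    · exact h
    · by_cases hf : f a = f b
      · exact absurd ((pvBefore_iff _ _ _ _).mpr (Or.inr ⟨hf.symm, h⟩)) hyx
      · rcases lt_or_gt_of_ne (show f a ≠ f b from hf) with hs | hs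
        · exact absurd ((pvBefore_iff _ _ _ _).mpr (Or.inl hs)) hyx
        · exact absurd ((pvBefore_iff _ _ _ _).mpr (Or.inl hs)) hxy
  rw [hab]

-- A's candidate-building loop is flatMap pvCand
theorem candidates_eq (ids : List String) (ds kws : List String) :
    ids.foldl (fun candidates eid =>
      if PySem.Str.isIn "." eid then
        let domain := ((PySem.Str.splitMax? eid "." 1).getD []).headD ""
        if decide (ds ≠ []) && !(ds.contains domain) then candidates
        else
          let lower := PySem.Str.lower eid
          let score : Int := 0
          let score := score + ((kws.filter (fun kw => PySem.Str.isIn kw lower)).map (fun _ => (4 : Int))).sum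
          let score := if PySem.Str.isIn "living" lower || PySem.Str.isIn "hall" lower || PySem.Str.isIn "main" lower then score + 1 else score
          candidates ++ [(score, PySem.Str.lower eid)]
      else candidates) ([] : List (Int × String)) = ids.flatMap (pvCand ds kws) := by
  have hf : (fun (candidates : List (Int × String)) (eid : String) =>
      if PySem.Str.isIn "." eid then
        let domain := ((PySem.Str.splitMax? eid "." 1).getD []).headD ""
        if decide (ds ≠ []) && !(ds.contains domain) then candidates
        else
          let lower := PySem.Str.lower eid
          let score : Int := 0
          let score := score + ((kws.filter (fun kw => PySem.Str.isIn kw lower)).map (fun _ => (4 : Int))).sum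
          let score := if PySem.Str.isIn "living" lower || PySem.Str.isIn "hall" lower || PySem.Str.isIn "main" lower then score + 1 else score
          candidates ++ [(score, PySem.Str.lower eid)]
      else candidates) = (fun acc eid => acc ++ pvCand ds kws eid) := by
    funext acc eid
    simp only [pvCand, pvScoreB]
    have hs : ((kws.filter (fun kw => PySem.Str.isIn kw (PySem.Str.lower eid))).map (fun _ => (4 : Int))).sum
        = 4 * (kws.countP (fun kw => PySem.Str.isIn kw (PySem.Str.lower eid)) : Int) := by
      rw [PySem.List.sum_map_const_int, List.countP_eq_length_filter]
      ring
    split_ifs <;> simp_all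
  rw [hf, PySem.List.foldl_append_eq_flatMap, List.nil_append]

-- the candidates are exactly B's lowered ids paired with their scores
theorem pvCand_eq (ds kws : List String) (e : String) :
    pvCand ds kws e =
      if PySem.Str.isIn "." e &&
         (decide (ds = []) || ds.contains (((PySem.Str.splitMax? e "." 1).getD []).headD ""))
      then [(pvScoreB kws (PySem.Str.lower e), PySem.Str.lower e)] else [] := by
  unfold pvCand
  by_cases h1 : PySem.Str.isIn "." e = true
  · rw [if_pos h1, h1]
    by_cases hds : ds = []
    · subst hds
      rw [if_neg (by simp), if_pos (by simp)]
    · by_cases hc : (((PySem.Str.splitMax? e "." 1).getD []).head?.getD "") ∈ ds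
      · rw [if_neg (by simp [hc]), if_pos (by simp [hc])]
      · rw [if_pos (by simp [hds, hc]), if_neg (by simp [hds, hc])]
  · rw [Bool.not_eq_true] at h1
    rw [if_neg (by rw [h1]; simp), h1, if_neg (by simp)]

theorem flatMap_pvCand (ids ds kws : List String) :
    ids.flatMap (pvCand ds kws) =
      (ids.filterMap (fun eid =>
        if PySem.Str.isIn "." eid &&
           (decide (ds = []) || ds.contains (((PySem.Str.splitMax? eid "." 1).getD []).headD ""))
        then some (PySem.Str.lower eid) else none)).map (fun l => (pvScoreB kws l, l)) := by
  induction ids with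
  | nil => rfl
  | cons e es ih =>
    rw [List.flatMap_cons, List.filterMap_cons, pvCand_eq]
    cases hc : (PySem.Str.isIn "." e &&
        (decide (ds = []) || ds.contains (((PySem.Str.splitMax? e "." 1).getD []).headD ""))) <;>
      simp [ih]

-- ===== VERDICT (by name: the statement is the Claim_ definition above) =====
theorem pick_known_entity_py_spec : Claim_equal_pick_known_entity_py := by
  intro ids domains keywords _
  unfold Spec_pick_known_entity_py pick_known_entity_py pick_known_entity_py_alt
  simp only [candidates_eq, flatMap_pvCand]
  set kws := (keywords.getD []).map (fun k => PySem.Str.lower k) with hkws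
  set ds := domains.getD [] with hds
  set lowers := ids.filterMap (fun eid =>
    if PySem.Str.isIn "." eid &&
       (decide (ds = []) || ds.contains (((PySem.Str.splitMax? eid "." 1).getD []).headD ""))
    then some (PySem.Str.lower eid) else none) with hlowers
  set f := pvScoreB kws with hfdef
  set cs := lowers.map (fun l => (f l, l)) with hcs
  by_cases h : lowers = []
  · simp [h, hcs]
  · have hcne : cs ≠ [] := by simp [hcs, h]
    rw [if_neg hcne, if_neg h]
    -- B's side: best and min are well-defined and minimal
    have hmapne : lowers.map f ≠ [] := by simp [h]
    obtain ⟨M, hM⟩ := Option.ne_none_iff_exists'.mp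
      (fun hn => hmapne ((PySem.List.max?_eq_none_iff (lowers.map f) (fun x => x)).mp hn))
    have hMmem : M ∈ lowers.map f := PySem.List.max?_mem hM
    have hMmax : ∀ v ∈ lowers.map f, v ≤ M := fun v hv => PySem.List.max?_isMax hM v hv
    obtain ⟨a, ha, hfa⟩ := List.mem_map.mp hMmem
    have hbest : (PySem.List.max? (lowers.map f) (fun x => x)).getD 0 = M := by rw [hM]; rfl
    rw [hbest]
    have hafil : a ∈ lowers.filter (fun l => f l == M) := by
      rw [List.mem_filter]; exact ⟨ha, by simp [hfa]⟩
    have hfilne : lowers.filter (fun l => f l == M) ≠ [] := fun hn => by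
      rw [hn] at hafil; exact absurd hafil (List.not_mem_nil)
    obtain ⟨m, hm⟩ := Option.ne_none_iff_exists'.mp
      (fun hn => hfilne ((PySem.List.min?_eq_none_iff (lowers.filter (fun l => f l == M)) (fun x => x)).mp hn))
    have hmmem := PySem.List.min?_mem hm
    have hmmin : ∀ y ∈ lowers.filter (fun l => f l == M), m ≤ y :=
      fun y hy => PySem.List.min?_isMin hm y hy
    obtain ⟨hmlow, hfm⟩ := List.mem_filter.mp hmmem
    have hfmM : f m = M := by simpa using hfm
    -- (M, m) is a pvBefore-minimal element of cs
    have hMm_mem : (M, m) ∈ cs := by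
      rw [hcs, List.mem_map]; exact ⟨m, hmlow, by rw [hfmM]⟩
    have hMm_min : ∀ x ∈ cs, pvBefore x (M, m) = false := by
      intro x hx
      obtain ⟨l, hl, rfl⟩ := List.mem_map.mp hx
      rw [Bool.eq_false_iff]
      intro hb
      rcases (pvBefore_iff _ _ _ _).mp hb with hgt | ⟨heq, hlt⟩
      · exact absurd (hMmax (f l) (List.mem_map_of_mem hl)) (by omega)
      · have : l ∈ lowers.filter (fun l => f l == M) := by
          rw [List.mem_filter]; exact ⟨hl, by simp [heq]⟩
        exact absurd (hmmin l this) (not_le_of_gt hlt)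
    -- A's side: the sorted head is the pvMin fold, which is also pvBefore-minimal
    obtain ⟨c, cs', hcse⟩ := List.exists_cons_of_ne_nil hcne
    obtain ⟨mA, hmA, hmAmem, hcb, hmAall⟩ := foldl_pvMin_some cs' c
    have hfoldcs : cs.foldl pvMin none = some mA := by
      rw [hcse, List.foldl_cons]; exact hmA
    have hmAmem' : mA ∈ cs := by
      rw [hcse]
      rcases hmAmem with rfl | hmem
      · exact List.mem_cons_self
      · exact List.mem_cons_of_mem _ hmem
    have hmAall' : ∀ x ∈ cs, pvBefore x mA = false := by
      intro x hx
      rw [hcse] at hx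
      rcases List.mem_cons.mp hx with rfl | hx
      · exact hcb
      · exact hmAall x hx
    -- uniqueness: mA = (M, m)
    have heq : mA = (M, m) :=
      pv_unique f lowers mA (M, m) (hcs ▸ hmAmem') (hcs ▸ hMm_mem)
        (hMm_min mA hmAmem') (hmAall' (M, m) hMm_mem)
    rw [List.headD_eq_head?, sorted2_head, hfoldcs, heq]
    simp [hm]
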